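-- pv_equiv track=rewrite | github.com/nvmexp/lw_firmware | src/pmu/build/VFieldTableGenerator/vfield_util/util.py | generateVfieldCTbl
-- ===== SOURCE A (Python) =====
-- def generateVfieldCTbl(vfield_tbl):
--     num_vfields = len(vfield_tbl)
--
--     generatedTbl = (
--         'static LwU32 s_vfieldRegAddrLookupTable[{n}]\n'.format(n=num_vfields)  +
--         '    GCC_ATTRIB_SECTION("dmem_perfVfe", "vfieldLookupTable") =\n' +
--         '{\n'
--     )
--     for i in range(0, len(vfield_tbl), 5):
--         if i != 0:
--             generatedTbl = generatedTbl + ',\n'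
--         generatedTbl = generatedTbl + '    {}'.format(', '.join(vfield_tbl[i:i+5]))
--     generatedTbl = generatedTbl + '\n};\n'
--
--     return generatedTbl
-- ===== SOURCE B (Python) =====
-- def generateVfieldCTbl(vfield_tbl):
--     out = (
--         'static LwU32 s_vfieldRegAddrLookupTable[{n}]\n'.format(n=len(vfield_tbl)) +
--         '    GCC_ATTRIB_SECTION("dmem_perfVfe", "vfieldLookupTable") =\n' +
--         '{\n'
--     )
--     for i, entry in enumerate(vfield_tbl):
--         if i == 0:
--             out += '    '
--         elif i % 5 == 0:
--             out += ',\n    '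
--         else:
--             out += ', '
--         out += entry
--     return out + '\n};\n'
-- ===== Notes on version B (the rewrite author's own statement) =====
-- stated objective: alternative
-- what changed: Replaces the slice-by-five loop (range step 5 + join of each slice) with a single element-by-element enumerate pass that picks the separator from the index modulo 5.
import Mathlib
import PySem

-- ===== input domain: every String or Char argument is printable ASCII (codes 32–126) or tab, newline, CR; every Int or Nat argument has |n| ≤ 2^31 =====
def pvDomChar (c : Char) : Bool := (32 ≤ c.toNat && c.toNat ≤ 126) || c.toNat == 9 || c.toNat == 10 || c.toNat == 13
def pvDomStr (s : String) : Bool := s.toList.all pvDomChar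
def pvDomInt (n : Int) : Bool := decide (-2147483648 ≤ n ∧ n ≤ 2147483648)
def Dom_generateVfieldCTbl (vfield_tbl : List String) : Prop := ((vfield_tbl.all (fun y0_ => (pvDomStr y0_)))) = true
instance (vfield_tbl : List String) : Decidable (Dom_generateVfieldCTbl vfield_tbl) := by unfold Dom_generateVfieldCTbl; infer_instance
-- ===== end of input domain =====

-- B replaces A's slice-by-five loop with a single element-wise enumerate pass choosing the
-- separator from the index modulo 5; same output, an alternative decomposition (no speed claim).


-- ===== PORT A =====
def generateVfieldCTbl (vfield_tbl : List String) : String :=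
  let num_vfields : Int := (vfield_tbl.length : Int)
  let generatedTbl : String :=
    "static LwU32 s_vfieldRegAddrLookupTable[" ++ PySem.Int.toStr num_vfields ++ "]\n" ++
    "    GCC_ATTRIB_SECTION(\"dmem_perfVfe\", \"vfieldLookupTable\") =\n" ++
    "{\n"
  let generatedTbl : String :=
    (PySem.List.pyRange 0 (vfield_tbl.length : Int) 5).foldl
      (fun acc i =>
        (if i ≠ 0 then acc ++ ",\n" else acc) ++
          ("    " ++ PySem.Str.join ", " (PySem.List.slice vfield_tbl (some i) (some (i + 5)))))
      generatedTbl
  generatedTbl ++ "\n};\n"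

-- ===== PORT B =====
def generateVfieldCTbl_alt (vfield_tbl : List String) : String :=
  let out : String :=
    "static LwU32 s_vfieldRegAddrLookupTable[" ++ PySem.Int.toStr (vfield_tbl.length : Int) ++ "]\n" ++
    "    GCC_ATTRIB_SECTION(\"dmem_perfVfe\", \"vfieldLookupTable\") =\n" ++
    "{\n"
  let out : String :=
    (PySem.List.enumerate vfield_tbl 0).foldl
      (fun acc p =>
        (acc ++
          (if p.1 == 0 then "    "
           else if PySem.Int.mod p.1 5 == 0 then ",\n    "
           else ", ")) ++ p.2)
      out
  out ++ "\n};\n"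

-- ===== PRECONDITION & SPEC =====
def Spec_generateVfieldCTbl (vfield_tbl : List String) (out : String) : Prop := out = generateVfieldCTbl_alt vfield_tbl
instance (vfield_tbl : List String) (out : String) : Decidable (Spec_generateVfieldCTbl vfield_tbl out) := by unfold Spec_generateVfieldCTbl; infer_instance

-- ===== CLAIM (what is proved, stated in full; the proofs are below) =====
def Claim_equal_generateVfieldCTbl : Prop := ∀ (vfield_tbl : List String), Dom_generateVfieldCTbl vfield_tbl → Spec_generateVfieldCTbl vfield_tbl (generateVfieldCTbl vfield_tbl)

-- ===== LEMMAS AND PROOFS =====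

-- A's loop body (slices refer to the list `ys`)
def fA (ys : List String) (acc : String) (i : Int) : String :=
  (if i ≠ 0 then acc ++ ",\n" else acc) ++
    ("    " ++ PySem.Str.join ", " (PySem.List.slice ys (some i) (some (i + 5))))

-- B's loop body
def fB (acc : String) (p : Int × String) : String :=
  (acc ++
    (if p.1 == 0 then "    "
     else if PySem.Int.mod p.1 5 == 0 then ",\n    "
     else ", ")) ++ p.2

-- common reference recursion: the rows after the first one, a chunk of five at a time
def rowsTail : List String → String → String
  | [], acc => acc
  | y :: t, acc =>
      rowsTail ((y :: t).drop 5)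
        ((acc ++ ",\n") ++ ("    " ++ PySem.Str.join ", " ((y :: t).take 5)))
  termination_by ys _ => ys.length
  decreasing_by simp; try omega

theorem mod_five (x : Int) : PySem.Int.mod x 5 = x % 5 := by
  simp [PySem.Int.mod, Int.fmod_eq_emod]

theorem range5_nil (n : Int) (h : n ≤ 0) : PySem.List.pyRange 0 n 5 = [] := by
  rw [PySem.List.pyRange_of_pos _ _ (by norm_num)]
  rw [if_neg (by omega)]
  simp

theorem range5_cons (n : Int) (h : 0 < n) :
    PySem.List.pyRange 0 n 5 = 0 :: (PySem.List.pyRange 0 (n - 5) 5).map (· + 5) := by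
  rw [PySem.List.pyRange_of_pos _ _ (by norm_num), PySem.List.pyRange_of_pos _ _ (by norm_num)]
  rw [if_pos (by omega)]
  by_cases h5 : 0 < n - 5
  · rw [if_pos h5]
    have hc2 : ((n - 0 + 5 - 1) / 5).toNat = ((n - 5 - 0 + 5 - 1) / 5).toNat + 1 := by omega
    rw [hc2, List.range_succ_eq_map]
    simp [List.map_map, Function.comp]
    intro a _
    ring
  · rw [if_neg h5]
    have hc2 : ((n - 0 + 5 - 1) / 5).toNat = 1 := by omega
    rw [hc2]
    simp

theorem slice_shift (ys : List String) (j : Int) (hj : 0 ≤ j) :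
    PySem.List.slice ys (some (j + 5)) (some (j + 5 + 5)) =
    PySem.List.slice (ys.drop 5) (some j) (some (j + 5)) := by
  rw [PySem.List.slice_toNat, PySem.List.slice_toNat]
  · rw [List.drop_drop]
    congr 1
    · omega
    · congr 1
      omega
  all_goals omega

theorem slice_head (ys : List String) : PySem.List.slice ys none (some 5) = ys.take 5 := by
  rw [PySem.List.slice_to]
  · rfl
  · norm_num

theorem rowsTail_nil (acc : String) : rowsTail [] acc = acc := by
  rw [rowsTail.eq_def]

theorem rowsTail_cons (y : String) (t : List String) (acc : String) :
    rowsTail (y :: t) acc =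
      rowsTail ((y :: t).drop 5)
        ((acc ++ ",\n") ++ ("    " ++ PySem.Str.join ", " ((y :: t).take 5))) := by
  rw [rowsTail.eq_def]

-- A side: the fold over the shifted range equals rowsTail of the dropped list
theorem A_gen (ys : List String) (acc : String) :
    ((PySem.List.pyRange 0 ((ys.length : Int) - 5) 5).map (· + 5)).foldl (fA ys) acc =
      rowsTail (ys.drop 5) acc := by
  by_cases hle : ys.length ≤ 5
  · rw [range5_nil _ (by omega)]
    have hnil : ys.drop 5 = [] := by
      apply List.eq_nil_of_length_eq_zero; simp; omega
    rw [hnil, rowsTail_nil]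
    rfl
  · push_neg at hle
    rw [range5_cons _ (by omega)]
    simp only [List.map_cons, List.foldl_cons]
    have hstep : fA ys acc (0 + 5) =
        (acc ++ ",\n") ++ ("    " ++ PySem.Str.join ", " ((ys.drop 5).take 5)) := by
      unfold fA
      rw [if_pos (by omega)]
      have h := slice_shift ys 0 (by omega)
      norm_num at h ⊢
      rw [h, slice_head]
    rw [hstep]
    rw [List.map_map, List.foldl_map]
    rw [PySem.List.foldl_congr_mem _ _
        (fun acc j => fA (ys.drop 5) acc (j + 5)) _ ?_]
    · have hrange : PySem.List.pyRange 0 ((ys.length : Int) - 5 - 5) 5 =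
          PySem.List.pyRange 0 (((ys.drop 5).length : Int) - 5) 5 := by
        congr 1
        simp
        omega
      rw [hrange, ← List.foldl_map]
      rw [A_gen (ys.drop 5)]
      obtain ⟨h, t, hht⟩ := List.exists_cons_of_ne_nil
        (show ys.drop 5 ≠ [] by
          intro hcon
          have := congrArg List.length hcon
          simp at this
          omega)
      rw [hht, rowsTail_cons, ← hht]
    · intro acc2 j hj
      have hj0 : 0 ≤ j := by
        rcases (PySem.List.mem_pyRange_iff_of_pos (by norm_num) j).mp hj with ⟨h1, _⟩
        exact h1
      show fA ys acc2 ((· + 5) ((· + 5) j)) = fA (ys.drop 5) acc2 (j + 5)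
      simp only
      unfold fA
      rw [if_pos (by omega), if_pos (by omega)]
      rw [slice_shift ys (j + 5) (by omega)]
termination_by ys.length
decreasing_by simp; try omega

-- A side, first row: the whole loop
theorem A_top (ys : List String) (acc : String) (hne : ys ≠ []) :
    (PySem.List.pyRange 0 ((ys.length : Int)) 5).foldl (fA ys) acc =
      rowsTail (ys.drop 5) (acc ++ ("    " ++ PySem.Str.join ", " (ys.take 5))) := by
  have hpos : (0 : Int) < (ys.length : Int) := by
    have := List.length_pos_iff.mpr hne
    exact_mod_cast this
  rw [range5_cons _ hpos]
  simp only [List.foldl_cons]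
  have h0 : fA ys acc 0 = acc ++ ("    " ++ PySem.Str.join ", " (ys.take 5)) := by
    unfold fA
    rw [if_neg (by omega)]
    norm_num
    rw [slice_head]
  rw [h0]
  exact A_gen ys _

-- B side: one chunk of at most five elements starting at index 5*m, m ≥ 1
theorem B_chunk (c : List String) (m : Int) (hm : 1 ≤ m) (h1 : c ≠ []) (h5 : c.length ≤ 5)
    (acc : String) :
    (PySem.List.enumerate c (5 * m)).foldl fB acc =
      (acc ++ ",\n") ++ ("    " ++ PySem.Str.join ", " c) := by
  have e0 : ((5 * m == 0) : Bool) = false := by simp; omega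
  have emod : ∀ k : Int, 1 ≤ k → k ≤ 4 →
      ((PySem.Int.mod (5 * m + k) 5 == 0) : Bool) = false := by
    intro k hk1 hk2; simp [mod_five]; omega
  have emodz : ((PySem.Int.mod (5 * m) 5 == 0) : Bool) = true := by
    simp [mod_five]
  have ene : ∀ k : Int, 1 ≤ k → ((5 * m + k == 0) : Bool) = false := by
    intro k hk; simp; omega
  match c with
  | [a] =>
      simp only [PySem.List.enumerate, List.foldl_cons, List.foldl_nil, fB, e0, emodz]
      apply String.toList_inj.mp
      simp [PySem.Str.join, PySem.Chars.join, List.intercalate]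
  | [a, b] =>
      have h1 := ene 1 (by norm_num)
      have h1' := emod 1 (by norm_num) (by norm_num)
      simp only [PySem.List.enumerate, List.foldl_cons, List.foldl_nil, fB, e0, emodz, h1, h1']
      apply String.toList_inj.mp
      simp [PySem.Str.join, PySem.Chars.join, List.intercalate]
  | [a, b, c] =>
      have h1 := ene 1 (by norm_num); have h1' := emod 1 (by norm_num) (by norm_num)
      have h2 : ((5 * m + 1 + 1 == 0) : Bool) = false := by simp; omega
      have h2' : ((PySem.Int.mod (5 * m + 1 + 1) 5 == 0) : Bool) = false := by
        simp [mod_five]; omega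
      simp only [PySem.List.enumerate, List.foldl_cons, List.foldl_nil, fB, e0, emodz, h1, h1', h2, h2']
      apply String.toList_inj.mp
      simp [PySem.Str.join, PySem.Chars.join, List.intercalate]
  | [a, b, c, d] =>
      have h1 := ene 1 (by norm_num); have h1' := emod 1 (by norm_num) (by norm_num)
      have h2 : ((5 * m + 1 + 1 == 0) : Bool) = false := by simp; omega
      have h2' : ((PySem.Int.mod (5 * m + 1 + 1) 5 == 0) : Bool) = false := by
        simp [mod_five]; omega
      have h3 : ((5 * m + 1 + 1 + 1 == 0) : Bool) = false := by simp; omega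
      have h3' : ((PySem.Int.mod (5 * m + 1 + 1 + 1) 5 == 0) : Bool) = false := by
        simp [mod_five]; omega
      simp only [PySem.List.enumerate, List.foldl_cons, List.foldl_nil, fB, e0, emodz,
        h1, h1', h2, h2', h3, h3']
      apply String.toList_inj.mp
      simp [PySem.Str.join, PySem.Chars.join, List.intercalate]
  | [a, b, c, d, e] =>
      have h1 := ene 1 (by norm_num); have h1' := emod 1 (by norm_num) (by norm_num)
      have h2 : ((5 * m + 1 + 1 == 0) : Bool) = false := by simp; omega
      have h2' : ((PySem.Int.mod (5 * m + 1 + 1) 5 == 0) : Bool) = false := by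
        simp [mod_five]; omega
      have h3 : ((5 * m + 1 + 1 + 1 == 0) : Bool) = false := by simp; omega
      have h3' : ((PySem.Int.mod (5 * m + 1 + 1 + 1) 5 == 0) : Bool) = false := by
        simp [mod_five]; omega
      have h4 : ((5 * m + 1 + 1 + 1 + 1 == 0) : Bool) = false := by simp; omega
      have h4' : ((PySem.Int.mod (5 * m + 1 + 1 + 1 + 1) 5 == 0) : Bool) = false := by
        simp [mod_five]; omega
      simp only [PySem.List.enumerate, List.foldl_cons, List.foldl_nil, fB, e0, emodz,
        h1, h1', h2, h2', h3, h3', h4, h4']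
      apply String.toList_inj.mp
      simp [PySem.Str.join, PySem.Chars.join, List.intercalate]
  | _ :: _ :: _ :: _ :: _ :: _ :: _ =>
      exfalso; simp at h5; omega

-- B side: the first chunk, starting at index 0
theorem B_chunk0 (c : List String) (h1 : c ≠ []) (h5 : c.length ≤ 5) (acc : String) :
    (PySem.List.enumerate c (0 : Int)).foldl fB acc =
      acc ++ ("    " ++ PySem.Str.join ", " c) := by
  have ene : ∀ k : Int, 1 ≤ k → k ≤ 4 →
      ((0 + (k : Int) == 0) : Bool) = false ∧ ((PySem.Int.mod (0 + k) 5 == 0) : Bool) = false := by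
    intro k hk1 hk2
    constructor <;> simp [mod_five] <;> omega
  match c with
  | [a] =>
      simp only [PySem.List.enumerate, List.foldl_cons, List.foldl_nil, fB]
      apply String.toList_inj.mp
      simp [PySem.Str.join, PySem.Chars.join, List.intercalate]
  | [a, b] =>
      obtain ⟨g1, g1'⟩ := ene 1 (by norm_num) (by norm_num)
      simp only [PySem.List.enumerate, List.foldl_cons, List.foldl_nil, fB, g1, g1']
      apply String.toList_inj.mp
      simp [PySem.Str.join, PySem.Chars.join, List.intercalate]
  | [a, b, c] =>
      obtain ⟨g1, g1'⟩ := ene 1 (by norm_num) (by norm_num)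
      have g2 : (((0 : Int) + 1 + 1 == 0) : Bool) = false := by simp
      have g2' : ((PySem.Int.mod ((0 : Int) + 1 + 1) 5 == 0) : Bool) = false := by decide
      simp only [PySem.List.enumerate, List.foldl_cons, List.foldl_nil, fB, g1, g1', g2, g2']
      apply String.toList_inj.mp
      simp [PySem.Str.join, PySem.Chars.join, List.intercalate]
  | [a, b, c, d] =>
      obtain ⟨g1, g1'⟩ := ene 1 (by norm_num) (by norm_num)
      have g2 : (((0 : Int) + 1 + 1 == 0) : Bool) = false := by simp
      have g2' : ((PySem.Int.mod ((0 : Int) + 1 + 1) 5 == 0) : Bool) = false := by decide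
      have g3 : (((0 : Int) + 1 + 1 + 1 == 0) : Bool) = false := by simp
      have g3' : ((PySem.Int.mod ((0 : Int) + 1 + 1 + 1) 5 == 0) : Bool) = false := by decide
      simp only [PySem.List.enumerate, List.foldl_cons, List.foldl_nil, fB, g1, g1', g2, g2', g3, g3']
      apply String.toList_inj.mp
      simp [PySem.Str.join, PySem.Chars.join, List.intercalate]
  | [a, b, c, d, e] =>
      obtain ⟨g1, g1'⟩ := ene 1 (by norm_num) (by norm_num)
      have g2 : (((0 : Int) + 1 + 1 == 0) : Bool) = false := by simp
      have g2' : ((PySem.Int.mod ((0 : Int) + 1 + 1) 5 == 0) : Bool) = false := by decide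
      have g3 : (((0 : Int) + 1 + 1 + 1 == 0) : Bool) = false := by simp
      have g3' : ((PySem.Int.mod ((0 : Int) + 1 + 1 + 1) 5 == 0) : Bool) = false := by decide
      have g4 : (((0 : Int) + 1 + 1 + 1 + 1 == 0) : Bool) = false := by simp
      have g4' : ((PySem.Int.mod ((0 : Int) + 1 + 1 + 1 + 1) 5 == 0) : Bool) = false := by decide
      simp only [PySem.List.enumerate, List.foldl_cons, List.foldl_nil, fB, g1, g1', g2, g2',
        g3, g3', g4, g4']
      apply String.toList_inj.mp
      simp [PySem.Str.join, PySem.Chars.join, List.intercalate]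
  | _ :: _ :: _ :: _ :: _ :: _ :: _ =>
      exfalso; simp at h5; omega

-- B side: everything from index 5*m (m ≥ 1) on equals rowsTail
theorem B_gen (ys : List String) (m : Int) (acc : String) (hm : 1 ≤ m) :
    (PySem.List.enumerate ys (5 * m)).foldl fB acc = rowsTail ys acc := by
  match hys : ys with
  | [] => rw [rowsTail_nil]; simp [PySem.List.enumerate]
  | y :: t =>
      conv_lhs => rw [← List.take_append_drop 5 (y :: t)]
      rw [PySem.List.enumerate_append, List.foldl_append]
      rw [B_chunk _ m hm (by simp) (by simp) acc]
      by_cases hle : (y :: t).length ≤ 5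
      · have hnil : (y :: t).drop 5 = [] := by
          apply List.eq_nil_of_length_eq_zero; simp; simp at hle; omega
        rw [hnil, rowsTail_cons, hnil, rowsTail_nil]
        simp [PySem.List.enumerate]
      · push_neg at hle
        have hlen : ((5 : Int) * m + ((y :: t).take 5).length = 5 * (m + 1)) := by
          rw [List.length_take]
          have : min 5 (y :: t).length = 5 := by omega
          rw [this]; push_cast; ring
        rw [hlen]
        rw [B_gen ((y :: t).drop 5) (m + 1) _ (by omega)]
        rw [rowsTail_cons]
termination_by ys.length
decreasing_by simp; try omega

-- B side: the whole loop
theorem B_top (ys : List String) (acc : String) (hne : ys ≠ []) :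
    (PySem.List.enumerate ys (0 : Int)).foldl fB acc =
      rowsTail (ys.drop 5) (acc ++ ("    " ++ PySem.Str.join ", " (ys.take 5))) := by
  conv_lhs => rw [← List.take_append_drop 5 ys]
  rw [PySem.List.enumerate_append, List.foldl_append]
  rw [B_chunk0 _ (by simp [hne]) (by simp) acc]
  by_cases hle : ys.length ≤ 5
  · have hnil : ys.drop 5 = [] := by
      apply List.eq_nil_of_length_eq_zero; simp; omega
    rw [hnil, rowsTail_nil]
    simp [PySem.List.enumerate]
  · push_neg at hle
    have hlen : ((0 : Int) + ((ys).take 5).length = 5 * 1) := by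
      rw [List.length_take]
      have : min 5 ys.length = 5 := by omega
      rw [this]; norm_num
    rw [hlen]
    exact B_gen (ys.drop 5) 1 _ (by norm_num)

-- ===== VERDICT (by name: the statement is the Claim_ definition above) =====
theorem generateVfieldCTbl_spec : Claim_equal_generateVfieldCTbl := by
  intro xs _
  unfold Spec_generateVfieldCTbl generateVfieldCTbl generateVfieldCTbl_alt
  simp only
  rcases xs with _ | ⟨y, t⟩
  · rfl
  · rw [show (fun (acc : String) (i : Int) =>
        (if i ≠ 0 then acc ++ ",\n" else acc) ++
          ("    " ++ PySem.Str.join ", " (PySem.List.slice (y :: t) (some i) (some (i + 5))))) =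
        fA (y :: t) from rfl]
    rw [show (fun (acc : String) (p : Int × String) =>
        (acc ++
          (if p.1 == 0 then "    "
           else if PySem.Int.mod p.1 5 == 0 then ",\n    "
           else ", ")) ++ p.2) = fB from rfl]
    rw [A_top _ _ (by simp), B_top _ _ (by simp)]
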